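-- pv_equiv track=rewrite | github.com/va64doman/codility | Challenges/pi2012.py | array_closest_ascenders
-- ===== SOURCE A (Python) =====
-- INF = 1000000123
--
-- def array_closest_ascenders(A):
--     N = len(A)
--     left = left_closest_ascenders(A)
--     A.reverse()
--     right = left_closest_ascenders(A)
--     right.reverse()
--     ret = [0] * N
--     for I in range(N):
--         ret[I] = min(left[I], right[I])
--         if ret[I] == INF:
--             ret[I] = 0
--     return ret
--     pass
--
-- def left_closest_ascenders(A):
--     N = len(A)
--     if (N == 0): return A
--     ret = [0] * N
--     stack = [0] * N
--     stack_size = 0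
--     for I in range(N):
--         while (stack_size > 0) and (A[stack[stack_size-1]] <= A[I]):
--             stack_size -= 1
--         if (stack_size == 0):
--             ret[I] = INF
--         else:
--             ret[I] = I - stack[stack_size-1]
--         stack[stack_size] = I
--         stack_size += 1
--     return ret
--     pass
-- ===== SOURCE B (Python) =====
-- # Naive per-index two-sided scan (O(N^2)) instead of A's monotonic-stack passes.
-- # Equivalence is about the RETURN value only: A reverses its argument in place, B does not mutate it.
-- INF = 1000000123
--
-- def array_closest_ascenders(A):
--     N = len(A)
--     res = []
--     for i in range(N):
--         v = A[i]
--         lj = first_greater(A, v, range(i - 1, -1, -1))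
--         rj = first_greater(A, v, range(i + 1, N))
--         ld = i - lj if lj is not None else INF
--         rd = rj - i if rj is not None else INF
--         d = min(ld, rd)
--         res.append(0 if d == INF else d)
--     return res
--
-- def first_greater(A, v, js):
--     for j in js:
--         if A[j] > v:
--             return j
--     return None
-- ===== Notes on version B (the rewrite author's own statement) =====
-- stated objective: simpler
-- what changed: Replaces the two monotonic-stack passes over the array and its reversal with one direct per-index scan that looks left and right for the first strictly larger element; no reversal, no stack, no sentinel bookkeeping across passes (A also reverses its argument in place, B does not mutate it; the return values are identical).
import Mathlib
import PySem

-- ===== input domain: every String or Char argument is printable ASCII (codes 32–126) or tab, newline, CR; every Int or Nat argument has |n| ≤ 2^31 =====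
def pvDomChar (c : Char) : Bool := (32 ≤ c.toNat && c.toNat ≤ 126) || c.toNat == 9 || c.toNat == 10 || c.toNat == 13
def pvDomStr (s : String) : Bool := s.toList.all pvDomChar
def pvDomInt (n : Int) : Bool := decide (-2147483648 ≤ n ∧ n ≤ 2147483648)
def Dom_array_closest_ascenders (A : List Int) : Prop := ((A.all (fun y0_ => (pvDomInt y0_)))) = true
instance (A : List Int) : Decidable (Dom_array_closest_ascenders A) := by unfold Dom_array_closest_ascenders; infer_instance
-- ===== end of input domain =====

-- B replaces A's two monotonic-stack passes by a direct per-index two-sided scan; equivalence is about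
-- the return value only (Python A reverses its argument in place, B does not mutate it).

-- ===== PORT A =====
def pvINF : Int := 1000000123

-- the inner 'while' loop of left_closest_ascenders: pop stack entries whose value is <= v
-- (stack modelled as a list of indices, head = top; Python's preallocated array + stack_size
-- behaves exactly as this stack). A[stack[...]] is always in range, ported as getD.
def pvPopWhile (A : List Int) (v : Int) : List Nat → List Nat
  | [] => []
  | j :: s => if A.getD j 0 ≤ v then pvPopWhile A v s else j :: s

-- the 'for I in range(N)' loop of left_closest_ascenders, run for the first I iterations;
-- returns (ret so far, stack)
def pvLeftLoop (A : List Int) : Nat → List Int × List Nat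
  | 0 => ([], [])
  | I + 1 =>
    let p := pvLeftLoop A I
    let s' := pvPopWhile A (A.getD I 0) p.2
    let r := match s' with
      | [] => pvINF
      | j :: _ => (I : Int) - (j : Int)
    (p.1 ++ [r], I :: s')

def left_closest_ascenders (A : List Int) : List Int :=
  if A.length = 0 then A else (pvLeftLoop A A.length).1

def array_closest_ascenders (A : List Int) : List Int :=
  let N := A.length
  let left := left_closest_ascenders A
  let Ar := A.reverse                                    -- A.reverse() (in-place in Python)
  let right := (left_closest_ascenders Ar).reverse
  -- final loop: ret[I] = min(left[I], right[I]); if ret[I] == INF: ret[I] = 0  (indices in range)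
  (List.range N).map (fun I =>
    let r := min (left.getD I 0) (right.getD I 0)
    if r = pvINF then 0 else r)

-- ===== PORT B =====
-- first_greater(A, v, js): first index j in js with A[j] > v (indices always in range)
def pvFirstGreater (A : List Int) (v : Int) : List Nat → Option Nat
  | [] => none
  | j :: js => if A.getD j 0 > v then some j else pvFirstGreater A v js

def array_closest_ascenders_alt (A : List Int) : List Int :=
  (List.range A.length).map (fun i =>
    let v := A.getD i 0
    let ld := match pvFirstGreater A v (List.range i).reverse with   -- range(i-1,-1,-1)
      | some j => (i : Int) - (j : Int)
      | none => pvINF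
    let rd := match pvFirstGreater A v (List.range' (i+1) (A.length - (i+1))) with  -- range(i+1,N)
      | some j => (j : Int) - (i : Int)
      | none => pvINF
    let d := min ld rd
    if d = pvINF then 0 else d)

-- ===== PRECONDITION & SPEC =====
def Spec_array_closest_ascenders (A : List Int) (out : List Int) : Prop := out = array_closest_ascenders_alt A
instance (A : List Int) (out : List Int) : Decidable (Spec_array_closest_ascenders A out) := by unfold Spec_array_closest_ascenders; infer_instance

-- ===== CLAIM (what is proved, stated in full; the proofs are below) =====
def Claim_equal_array_closest_ascenders : Prop := ∀ (A : List Int), Dom_array_closest_ascenders A → Spec_array_closest_ascenders A (array_closest_ascenders A)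

-- ===== LEMMAS AND PROOFS =====

-- popping up to v after popping up to u ≤ v is the same as popping up to v directly
theorem pvPopWhile_pvPopWhile (A : List Int) (u v : Int) (h : u ≤ v) (s : List Nat) :
    pvPopWhile A v (pvPopWhile A u s) = pvPopWhile A v s := by
  induction s with
  | nil => rfl
  | cons j s ih =>
    simp only [pvPopWhile]
    by_cases hj : A.getD j 0 ≤ u
    · rw [if_pos hj, ih, if_pos (hj.trans h)]
    · rw [if_neg hj]
      rfl

-- the stack top after pops = the first (largest) earlier index with a strictly larger value
theorem pvStack_head (A : List Int) (I : Nat) (v : Int) :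
    (pvPopWhile A v (pvLeftLoop A I).2).head? = pvFirstGreater A v (List.range I).reverse := by
  induction I generalizing v with
  | zero => rfl
  | succ I ih =>
    have hr : (List.range (I+1)).reverse = I :: (List.range I).reverse := by
      simp [List.range_succ]
    rw [hr]
    show (pvPopWhile A v (I :: pvPopWhile A (A.getD I 0) (pvLeftLoop A I).2)).head? = _
    simp only [pvPopWhile, pvFirstGreater]
    by_cases hI : A.getD I 0 ≤ v
    · rw [if_pos hI, if_neg (not_lt.mpr hI), pvPopWhile_pvPopWhile A (A.getD I 0) v hI]
      exact ih v
    · rw [if_neg hI, if_pos (lt_of_not_ge hI)]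
      rfl

-- per-index value of B's left scan
def pvLeftVal (A : List Int) (i : Nat) : Int :=
  match pvFirstGreater A (A.getD i 0) (List.range i).reverse with
  | some j => (i : Int) - (j : Int)
  | none => pvINF

-- the ret array built by A's left pass is B's left scan, index by index
theorem pvLeftLoop_fst (A : List Int) (I : Nat) :
    (pvLeftLoop A I).1 = (List.range I).map (pvLeftVal A) := by
  induction I with
  | zero => rfl
  | succ I ih =>
    show (pvLeftLoop A I).1 ++ [_] = _
    rw [ih, List.range_succ, List.map_append, List.map_singleton]
    congr 1
    unfold pvLeftVal
    rw [← pvStack_head A I (A.getD I 0)]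
    cases pvPopWhile A (A.getD I 0) (pvLeftLoop A I).2 <;> rfl

theorem pvFirstGreater_mem (A : List Int) (v : Int) (js : List Nat) (j : Nat)
    (h : pvFirstGreater A v js = some j) : j ∈ js := by
  induction js with
  | nil => simp [pvFirstGreater] at h
  | cons k ks ih =>
    simp only [pvFirstGreater] at h
    by_cases hk : A.getD k 0 > v
    · rw [if_pos hk] at h
      simp only [Option.some_inj] at h
      simp [h]
    · rw [if_neg hk] at h
      exact List.mem_cons_of_mem _ (ih h)

-- scanning the reversed array = scanning the original on mirrored indices
theorem pvFirstGreater_reverse (A : List Int) (v : Int) (js : List Nat)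
    (hjs : ∀ j ∈ js, j < A.length) :
    pvFirstGreater A.reverse v js
      = Option.map (fun k => A.length - 1 - k) (pvFirstGreater A v (js.map (fun j => A.length - 1 - j))) := by
  induction js with
  | nil => rfl
  | cons j js ih =>
    have hj : j < A.length := hjs j (List.mem_cons_self ..)
    have hval : A.reverse.getD j 0 = A.getD (A.length - 1 - j) 0 := by
      rw [List.getD_eq_getElem _ _ (by simpa using hj),
          List.getD_eq_getElem _ _ (by omega)]
      simp [List.getElem_reverse]
    simp only [List.map_cons, pvFirstGreater, hval]
    by_cases hgt : A.getD (A.length - 1 - j) 0 > v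
    · have hjj : A.length - 1 - (A.length - 1 - j) = j := by omega
      rw [if_pos hgt, if_pos hgt]
      simp [hjj]
    · rw [if_neg hgt, if_neg hgt]
      exact ih (fun k hk => hjs k (List.mem_cons_of_mem _ hk))

-- mirrored descending prefix = ascending suffix
theorem pvRange_reverse_map (N m : Nat) (h : m ≤ N) :
    (List.range m).reverse.map (fun j => N - 1 - j) = List.range' (N - m) m := by
  induction m with
  | zero => rfl
  | succ m ih =>
    rw [List.range_succ, List.reverse_append]
    simp only [List.reverse_singleton, List.singleton_append, List.map_cons]
    rw [ih (by omega)]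
    have h1 : N - (m+1) = N - 1 - m := by omega
    have h2 : N - 1 - m + 1 = N - m := by omega
    rw [List.range'_succ, h1, h2]

-- B's right scan at i is A's left pass on the reversed array at the mirrored index
theorem pvLeftVal_reverse (A : List Int) (i : Nat) (hi : i < A.length) :
    pvLeftVal A.reverse (A.length - 1 - i)
      = (match pvFirstGreater A (A.getD i 0) (List.range' (i+1) (A.length - (i+1))) with
         | some j => (j : Int) - (i : Int)
         | none => pvINF) := by
  have hvv : A.reverse.getD (A.length - 1 - i) 0 = A.getD i 0 := by
    rw [List.getD_eq_getElem _ _ (by simp; omega), List.getD_eq_getElem _ _ (by omega)]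
    simp only [List.getElem_reverse]
    congr 1
    omega
  have hlen : ∀ j ∈ (List.range (A.length - 1 - i)).reverse, j < A.length := by
    intro j hj
    simp only [List.mem_reverse, List.mem_range] at hj
    omega
  have hmap : (List.range (A.length - 1 - i)).reverse.map (fun j => A.length - 1 - j)
      = List.range' (i+1) (A.length - (i+1)) := by
    have h0 := pvRange_reverse_map A.length (A.length - 1 - i) (by omega)
    have h1 : A.length - (A.length - 1 - i) = i + 1 := by omega
    have h2 : A.length - (i+1) = A.length - 1 - i := by omega
    rw [h0, h1, h2]
  unfold pvLeftVal
  rw [hvv, pvFirstGreater_reverse A (A.getD i 0) _ hlen, hmap]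
  cases hfg : pvFirstGreater A (A.getD i 0) (List.range' (i+1) (A.length - (i+1))) with
  | none => rfl
  | some k =>
    have hk := pvFirstGreater_mem _ _ _ _ hfg
    rw [List.mem_range'] at hk
    simp only [Option.map_some]
    show ((A.length - 1 - i : Nat) : Int) - ((A.length - 1 - k : Nat) : Int) = (k : Int) - (i : Int)
    omega

-- getD of a map over range
theorem pvGetD_map_range (f : Nat → Int) (N i : Nat) (hi : i < N) :
    ((List.range N).map f).getD i 0 = f i := by
  rw [List.getD_eq_getElem _ _ (by simpa using hi)]
  simp

-- ===== VERDICT (by name: the statement is the Claim_ definition above) =====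
theorem array_closest_ascenders_spec : Claim_equal_array_closest_ascenders := by
  intro A _
  show _ = _
  unfold array_closest_ascenders array_closest_ascenders_alt
  by_cases hN : A.length = 0
  · simp [hN, left_closest_ascenders]
  · have hNpos : 0 < A.length := Nat.pos_of_ne_zero hN
    have hL : left_closest_ascenders A = (List.range A.length).map (pvLeftVal A) := by
      rw [left_closest_ascenders, if_neg hN, pvLeftLoop_fst]
    have hRlen : A.reverse.length ≠ 0 := by simpa using hN
    have hR : left_closest_ascenders A.reverse = (List.range A.length).map (pvLeftVal A.reverse) := by
      rw [left_closest_ascenders, if_neg hRlen, pvLeftLoop_fst, List.length_reverse]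
    simp only [hL, hR]
    apply List.map_congr_left
    intro i hi
    rw [List.mem_range] at hi
    have hleft : ((List.range A.length).map (pvLeftVal A)).getD i 0 = pvLeftVal A i :=
      pvGetD_map_range _ _ _ hi
    have hright : ((List.range A.length).map (pvLeftVal A.reverse)).reverse.getD i 0
        = pvLeftVal A.reverse (A.length - 1 - i) := by
      rw [List.getD_eq_getElem _ _ (by simpa using hi)]
      rw [List.getElem_reverse]
      simp only [List.length_map, List.length_range]
      rw [List.getElem_map, List.getElem_range]
    rw [hleft, hright, pvLeftVal_reverse A i hi]
    rfl
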